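-- pv_equiv track=rewrite | github.com/amallah/route-optimizer | optimize.py | grab
-- ===== SOURCE A (Python) =====
-- def grab(agent_genome, index):
--     ct = 0
--     for key in agent_genome.keys():
--        for item in agent_genome[key]:
--            if (ct==index):
--                return(item)
--            ct+=1
--     return ""
-- ===== SOURCE B (Python) =====
-- def grab(agent_genome, index):
--     if index < 0:
--         return ""
--     for items in agent_genome.values():
--         n = len(items)
--         if index < n:
--             return items[index]
--         index -= n
--     return ""
-- ===== Notes on version B (the rewrite author's own statement) =====
-- stated objective: alternative
-- what changed: Instead of counting every item one by one up to the target index, B skips whole value-lists at once using len() and then indexes directly into the block that contains the flattened index.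
import Mathlib
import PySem

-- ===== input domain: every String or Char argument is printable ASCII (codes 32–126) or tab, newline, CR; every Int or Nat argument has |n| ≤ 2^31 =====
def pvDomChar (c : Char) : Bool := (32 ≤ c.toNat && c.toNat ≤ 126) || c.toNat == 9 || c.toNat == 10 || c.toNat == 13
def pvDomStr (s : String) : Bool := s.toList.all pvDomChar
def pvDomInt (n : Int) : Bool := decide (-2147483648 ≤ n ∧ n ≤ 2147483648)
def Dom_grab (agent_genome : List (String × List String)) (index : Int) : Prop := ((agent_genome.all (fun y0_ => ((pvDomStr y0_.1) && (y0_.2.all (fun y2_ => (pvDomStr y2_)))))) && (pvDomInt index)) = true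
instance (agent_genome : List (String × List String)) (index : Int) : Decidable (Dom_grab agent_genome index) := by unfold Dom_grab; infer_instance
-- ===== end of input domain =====

-- ===== PORT A =====
-- B replaces A's item-by-item counting walk by block skipping via per-key lengths (objective: alternative).
-- A's 'for key in agent_genome.keys(): for item in agent_genome[key]': for a dict, looking the
-- iterated key up yields exactly that entry's value list, so the port walks the (key, items)
-- pairs of the association list in order, keeping A's running counter ct and early return.
def grabInner (index : Int) : List String → Int → Option String × Int
  | [], ct => (none, ct)
  | item :: rest, ct => if ct = index then (some item, ct) else grabInner index rest (ct + 1)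

def grabOuter (index : Int) : List (String × List String) → Int → String
  | [], _ => ""
  | (_, items) :: rest, ct =>
      match grabInner index items ct with
      | (some item, _) => item
      | (none, ct') => grabOuter index rest ct'

def grab (agent_genome : List (String × List String)) (index : Int) : String :=
  grabOuter index agent_genome 0

-- ===== PORT B =====
def grabAltLoop : List (List String) → Int → String
  | [], _ => ""
  | items :: rest, idx =>
      if idx < PySem.List.len items then PySem.List.pyGetD items idx ""
      else grabAltLoop rest (idx - PySem.List.len items)

def grab_alt (agent_genome : List (String × List String)) (index : Int) : String :=
  if index < 0 then "" else grabAltLoop (agent_genome.map Prod.snd) index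

-- ===== PRECONDITION & SPEC =====
def Spec_grab (agent_genome : List (String × List String)) (index : Int) (out : String) : Prop := out = grab_alt agent_genome index
instance (agent_genome : List (String × List String)) (index : Int) (out : String) : Decidable (Spec_grab agent_genome index out) := by unfold Spec_grab; infer_instance

-- ===== CLAIM (what is proved, stated in full; the proofs are below) =====
def Claim_equal_grab : Prop := ∀ (agent_genome : List (String × List String)) (index : Int), Dom_grab agent_genome index → Spec_grab agent_genome index (grab agent_genome index)

-- ===== LEMMAS AND PROOFS =====
theorem grabInner_miss (index : Int) (items : List String) (ct : Int)
    (h : index < ct ∨ ct + items.length ≤ index) :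
    grabInner index items ct = (none, ct + items.length) := by
  induction items generalizing ct with
  | nil => simp [grabInner]
  | cons item rest ih =>
      have hne : ct ≠ index := by simp at h; omega
      have := ih (ct + 1) (by simp at h ⊢; omega)
      simp [grabInner, hne, this]
      omega

theorem grabInner_hit (index : Int) (items : List String) (ct : Int)
    (h1 : ct ≤ index) (h2 : index < ct + items.length) :
    grabInner index items ct = (some (items.getD (index - ct).toNat ""), index) := by
  induction items generalizing ct with
  | nil => simp at h2; omega
  | cons item rest ih =>
      by_cases he : ct = index
      · simp [grabInner, he]
      · have hlt : ct + 1 ≤ index := by omega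
        have := ih (ct + 1) hlt (by simp at h2 ⊢; omega)
        have hn : (index - ct).toNat = (index - (ct + 1)).toNat + 1 := by omega
        simp [grabInner, he, this, hn]

theorem grabOuter_eq_alt (index : Int) (ps : List (String × List String)) (ct : Int)
    (hct : 0 ≤ ct) :
    grabOuter index ps ct =
      if index < ct then "" else grabAltLoop (ps.map Prod.snd) (index - ct) := by
  induction ps generalizing ct with
  | nil => simp [grabOuter, grabAltLoop]
  | cons p rest ih =>
      obtain ⟨k, items⟩ := p
      by_cases hlt : index < ct
      · have hm := grabInner_miss index items ct (Or.inl hlt)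
        have := ih (ct + items.length) (by omega)
        simp [grabOuter, hm, this, hlt, show index < ct + (items.length : Int) by omega]
      · by_cases h2 : index < ct + items.length
        · have hh := grabInner_hit index items ct (by omega) h2
          have hget : PySem.List.pyGetD items (index - ct) "" = items.getD (index - ct).toNat "" := by
            simp only [PySem.List.pyGetD, List.getD_eq_getElem?_getD]
            rw [PySem.List.pyGet?_of_nonneg]
            omega
          simp [grabOuter, hh, grabAltLoop, hlt, PySem.List.len_eq,
                show index - ct < (items.length : Int) by omega, hget]
        · have hm := grabInner_miss index items ct (Or.inr (by omega))
          have := ih (ct + items.length) (by omega)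
          simp [grabOuter, hm, this, hlt, grabAltLoop, PySem.List.len_eq,
                show ¬ index - ct < (items.length : Int) by omega,
                show ¬ index < ct + (items.length : Int) by omega,
                show index - (ct + (items.length : Int)) = index - ct - items.length by ring]

-- ===== VERDICT (by name: the statement is the Claim_ definition above) =====
theorem grab_spec : Claim_equal_grab := by
  intro agent_genome index _
  unfold Spec_grab grab grab_alt
  have := grabOuter_eq_alt index agent_genome 0 le_rfl
  simpa using this
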